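-- pv_equiv track=rewrite | github.com/hivesolutions/netius | src/netius/extra/proxy_c.py | _resolve_domain
-- ===== SOURCE A (Python) =====
-- def _resolve_domain(service, tags):
--     name = None
--     domain = None
--     for tag in tags:
--         if tag.startswith("proxy.name=") and name == None:
--             name = tag[len("proxy.name=") :]
--         elif tag.startswith("proxy.domain=") and domain == None:
--             domain = tag[len("proxy.domain=") :]
--     if name:
--         return str(name)
--     if domain:
--         return str(domain)
--     return str(service.lower())
-- ===== SOURCE B (Python) =====
-- def _resolve_domain(service, tags):
--     index = {}
--     for tag in tags:
--         i = tag.find("=")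
--         if i >= 0:
--             index.setdefault(tag[:i], tag[i + 1:])
--     return str(index.get("proxy.name") or index.get("proxy.domain") or service.lower())
-- ===== Notes on version B (the rewrite author's own statement) =====
-- stated objective: alternative
-- what changed: Replaces A's prefix-testing loop with two None-guarded accumulators by a generic key=value parse (first '=' via find) into a first-wins dict index built in one pass, followed by two dictionary lookups and the same falsy-or fallback chain.
import Mathlib
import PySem

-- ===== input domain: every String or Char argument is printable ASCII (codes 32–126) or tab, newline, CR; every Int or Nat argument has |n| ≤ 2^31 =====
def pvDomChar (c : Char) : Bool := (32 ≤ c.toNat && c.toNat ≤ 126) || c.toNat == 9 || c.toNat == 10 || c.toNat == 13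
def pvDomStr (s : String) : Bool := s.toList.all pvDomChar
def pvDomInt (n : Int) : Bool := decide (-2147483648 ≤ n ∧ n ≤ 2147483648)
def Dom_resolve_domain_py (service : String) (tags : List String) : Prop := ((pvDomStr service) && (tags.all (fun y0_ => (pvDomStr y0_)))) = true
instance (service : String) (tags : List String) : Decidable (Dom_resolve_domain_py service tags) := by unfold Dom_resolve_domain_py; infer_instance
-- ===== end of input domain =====

-- B: instead of A's prefix-testing loop with two None-guarded accumulators, B parses every
-- "key=value" tag generically (first '=' via find) into a first-wins dict index built in one
-- pass, then looks up the two keys; objective: alternative (same cost, different algorithm).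

-- ===== PORT A =====
-- loop body of A's for-loop: state = (name, domain), branches in A's order
def pvStepA (st : Option String × Option String) (tag : String) : Option String × Option String :=
  if PySem.Str.startswith tag "proxy.name=" ∧ st.1 = none then
    (some (PySem.Str.slice tag (some 11) none), st.2)
  else if PySem.Str.startswith tag "proxy.domain=" ∧ st.2 = none then
    (st.1, some (PySem.Str.slice tag (some 13) none))
  else st

def resolve_domain_py (service : String) (tags : List String) : String :=
  let st := tags.foldl pvStepA (none, none)
  match st.1 with
  | some n =>
      if n ≠ "" then n
      else match st.2 with
           | some d => if d ≠ "" then d else PySem.Str.lower service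
           | none => PySem.Str.lower service
  | none =>
      match st.2 with
      | some d => if d ≠ "" then d else PySem.Str.lower service
      | none => PySem.Str.lower service

-- ===== PORT B =====
-- body of B's indexing loop: i = tag.find("="); if i >= 0: index.setdefault(tag[:i], tag[i+1:])
def pvStepB (d : PySem.Dict String String) (tag : String) : PySem.Dict String String :=
  let i := PySem.Str.find tag "="
  if 0 ≤ i then
    d.setdefault (PySem.Str.slice tag none (some i)) (PySem.Str.slice tag (some (i + 1)) none)
  else d

-- Python's 'x or …' on an Optional[str]: some "" and none are both falsy
def pvTruthy (x : Option String) : Option String :=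
  match x with
  | some s => if s ≠ "" then some s else none
  | none => none

def resolve_domain_py_alt (service : String) (tags : List String) : String :=
  let index := tags.foldl pvStepB PySem.Dict.empty
  match pvTruthy (index.get? "proxy.name") with
  | some s => s
  | none =>
      match pvTruthy (index.get? "proxy.domain") with
      | some s => s
      | none => PySem.Str.lower service

-- ===== PRECONDITION & SPEC =====
def Spec_resolve_domain_py (service : String) (tags : List String) (out : String) : Prop := out = resolve_domain_py_alt service tags
instance (service : String) (tags : List String) (out : String) : Decidable (Spec_resolve_domain_py service tags out) := by unfold Spec_resolve_domain_py; infer_instance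

-- ===== CLAIM (what is proved, stated in full; the proofs are below) =====
def Claim_equal_resolve_domain_py : Prop := ∀ (service : String) (tags : List String), Dom_resolve_domain_py service tags → Spec_resolve_domain_py service tags (resolve_domain_py service tags)

-- ===== LEMMAS AND PROOFS =====
-- a tag cannot carry both prefixes
theorem pv_disj (t : String) (hN : PySem.Str.startswith t "proxy.name=" = true) :
    PySem.Str.startswith t "proxy.domain=" = false := by
  by_contra h
  have hD : PySem.Str.startswith t "proxy.domain=" = true := by
    cases hx : PySem.Str.startswith t "proxy.domain=" <;> simp_all
  rw [PySem.Str.startswith_eq, PySem.Chars.startswith_iff] at hN hD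
  rcases List.prefix_or_prefix_of_prefix hN hD with h1 | h1 <;> revert h1 <;> decide

theorem pvN_chars : "proxy.name=".toList = ['p','r','o','x','y','.','n','a','m','e','='] := by decide
theorem pvD_chars : "proxy.domain=".toList = ['p','r','o','x','y','.','d','o','m','a','i','n','='] := by decide

-- A's loop computes the two first matches independently
theorem pv_loop_eq (tags : List String) : ∀ n d : Option String,
    tags.foldl pvStepA (n, d) =
      (n.or ((tags.find? (fun t => PySem.Str.startswith t "proxy.name=")).map
        (fun t => PySem.Str.slice t (some 11) none)),
       d.or ((tags.find? (fun t => PySem.Str.startswith t "proxy.domain=")).map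
        (fun t => PySem.Str.slice t (some 13) none))) := by
  induction tags with
  | nil => intro n d; simp
  | cons t ts ih =>
    intro n d
    by_cases hN : PySem.Str.startswith t "proxy.name=" = true
    · have hD := pv_disj t hN
      rw [PySem.Str.startswith_eq, pvN_chars] at hN
      rw [PySem.Str.startswith_eq, pvD_chars] at hD
      cases n with
      | none => simp [List.foldl_cons, pvStepA, hN, hD, List.find?, ih]
      | some a => simp [List.foldl_cons, pvStepA, hN, hD, List.find?, ih]
    · have hN' : PySem.Str.startswith t "proxy.name=" = false := by
        cases hx : PySem.Str.startswith t "proxy.name=" <;> simp_all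
      rw [PySem.Str.startswith_eq, pvN_chars] at hN'
      by_cases hD : PySem.Str.startswith t "proxy.domain=" = true
      · rw [PySem.Str.startswith_eq, pvD_chars] at hD
        cases d with
        | none => simp [List.foldl_cons, pvStepA, hN', hD, List.find?, ih]
        | some b => simp [List.foldl_cons, pvStepA, hN', hD, List.find?, ih]
      · have hD' : PySem.Str.startswith t "proxy.domain=" = false := by
          cases hx : PySem.Str.startswith t "proxy.domain=" <;> simp_all
        rw [PySem.Str.startswith_eq, pvD_chars] at hD'
        simp [List.foldl_cons, pvStepA, hN', hD', List.find?, ih]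

-- [c] is a prefix exactly of lists starting with c
theorem pv_pref_singleton (c : Char) (l : List Char) : [c] <+: l ↔ l.head? = some c := by
  cases l with
  | nil => simp
  | cons x xs => simp [List.cons_prefix_cons, eq_comm]

-- first '=' of key ++ '=' :: rest is at index key.length when key has no '='
theorem pv_find_key (key rest : List Char) (hk : '=' ∉ key) :
    PySem.Chars.find (key ++ '=' :: rest) ['='] = (key.length : Int) := by
  have hinf : ['='] <:+: (key ++ '=' :: rest) := ⟨key, rest, by simp⟩
  have h0 : 0 ≤ PySem.Chars.find (key ++ '=' :: rest) ['='] :=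
    (PySem.Chars.find_nonneg_iff _ _).2 hinf
  obtain ⟨h1, h2⟩ := PySem.Chars.find_spec h0
  set n := (PySem.Chars.find (key ++ '=' :: rest) ['=']).toNat with hn
  have hat : (key ++ '=' :: rest)[n]? = some '=' := by
    have := (pv_pref_singleton '=' _).1 h1
    rwa [List.head?_drop] at this
  have hne : ¬ n < key.length := by
    intro hlt
    have : (key ++ '=' :: rest)[n]? = key[n]? := by
      rw [List.getElem?_append_left hlt]
    rw [this] at hat
    exact hk (List.mem_of_getElem? hat)
  have hle : ¬ key.length < n := by
    intro hgt
    have hdrop : (key ++ '=' :: rest).drop key.length = '=' :: rest := by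
      simp
    exact h2 key.length hgt (by rw [hdrop]; exact ⟨rest, rfl⟩)
  have : n = key.length := by omega
  omega

-- B's indexing loop: the first-wins dict holds, at key, the suffix of the first tag with prefix key ++ "="
theorem pv_fold_get (key pref : String) (m : Int)
    (hpref : pref.toList = key.toList ++ ['='])
    (hk : '=' ∉ key.toList) (hm : m = (key.toList.length : Int) + 1) :
    ∀ (ts : List String) (d : PySem.Dict String String),
    (ts.foldl pvStepB d).get? key =
      (d.get? key).or ((ts.find? (fun t => PySem.Str.startswith t pref)).map
        (fun t => PySem.Str.slice t (some m) none)) := by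
  intro ts
  induction ts with
  | nil => intro d; simp
  | cons t ts ih =>
    intro d
    by_cases hs : PySem.Str.startswith t pref = true
    · -- t = key ++ '=' :: rest
      have hp : pref.toList <+: t.toList := by
        rw [PySem.Str.startswith_eq] at hs; exact (PySem.Chars.startswith_iff _ _).1 hs
      obtain ⟨rest, hrest⟩ := hp
      rw [hpref] at hrest
      have hcs : t.toList = key.toList ++ '=' :: rest := by
        rw [← hrest]; simp
      have hfind : PySem.Str.find t "=" = (key.toList.length : Int) := by
        rw [PySem.Str.find_eq]
        have : "=".toList = ['='] := by decide
        rw [this, hcs]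
        exact pv_find_key _ _ hk
      have hkey : PySem.Str.slice t none (some (key.toList.length : Int)) = key := by
        rw [← String.toList_inj, PySem.Str.toList_slice]
        simp only [PySem.Chars.slice_eq_listSlice]
        rw [PySem.List.slice_to _ (Int.natCast_nonneg _), Int.toNat_natCast, hcs, List.take_left]
      have hstep : pvStepB d t =
          d.setdefault key (PySem.Str.slice t (some m) none) := by
        simp only [pvStepB, hfind, hkey, hm]
        rw [if_pos (Int.natCast_nonneg _)]
      have hsC := hs
      rw [PySem.Str.startswith_eq] at hsC
      have hfind? : List.find? (fun x => PySem.Str.startswith x pref) (t :: ts) = some t := by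
        simp [hsC]
      rw [List.foldl_cons, hstep, ih, PySem.Dict.get?_setdefault_self, hfind?]
      cases d.get? key <;> simp
    · have hs' : PySem.Str.startswith t pref = false := by
        cases hx : PySem.Str.startswith t pref <;> simp_all
      have hfind? : List.find? (fun x => PySem.Str.startswith x pref) (t :: ts) =
          List.find? (fun x => PySem.Str.startswith x pref) ts := by
        have hsC := hs'
        rw [PySem.Str.startswith_eq] at hsC
        simp [hsC]
      rw [List.foldl_cons, hfind?]
      by_cases hi : 0 ≤ PySem.Str.find t "="
      · -- tag has an '=', but its key differs from our key
        set i := PySem.Str.find t "=" with hidef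
        have hfc : PySem.Chars.find t.toList ['='] = i := by
          rw [hidef, PySem.Str.find_eq]; congr 1
        have hspec := PySem.Chars.find_spec (s := t.toList) (sub := ['=']) (by rw [hfc]; exact hi)
        rw [hfc] at hspec
        obtain ⟨h1, _⟩ := hspec
        have hat : t.toList[i.toNat]? = some '=' := by
          have := (pv_pref_singleton '=' _).1 h1
          rwa [List.head?_drop] at this
        have hlen : i.toNat < t.toList.length := by
          by_contra hc
          rw [List.getElem?_eq_none (by omega)] at hat
          simp at hat
        have hne : PySem.Str.slice t none (some i) ≠ key := by
          intro heq
          have htake : t.toList.take i.toNat = key.toList := by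
            have := congrArg String.toList heq
            rw [PySem.Str.toList_slice] at this
            simp only [PySem.Chars.slice_eq_listSlice] at this
            rwa [PySem.List.slice_to _ hi] at this
          have h3 : t.toList[i.toNat] = '=' := by
            have h4 := hat
            rw [List.getElem?_eq_getElem hlen] at h4
            exact Option.some.inj h4
          have hcs : t.toList = key.toList ++ '=' :: t.toList.drop (i.toNat + 1) := by
            conv_lhs => rw [← List.take_append_drop i.toNat t.toList]
            rw [htake, List.drop_eq_getElem_cons hlen, h3]
          apply hs
          rw [PySem.Str.startswith_eq, PySem.Chars.startswith_iff, hpref, hcs]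
          exact ⟨t.toList.drop (i.toNat + 1), by simp⟩
        have hstep : pvStepB d t =
            d.setdefault (PySem.Str.slice t none (some i))
              (PySem.Str.slice t (some (i + 1)) none) := by
          simp only [pvStepB]; rw [if_pos hi]
        rw [hstep, ih, PySem.Dict.get?_setdefault_of_ne _ _ (Ne.symm hne)]
      · have hstep : pvStepB d t = d := by
          simp only [pvStepB]; rw [if_neg hi]
        rw [hstep, ih]

theorem pv_fold_name (ts : List String) :
    (ts.foldl pvStepB PySem.Dict.empty).get? "proxy.name" =
      (ts.find? (fun t => PySem.Str.startswith t "proxy.name=")).map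
        (fun t => PySem.Str.slice t (some 11) none) := by
  rw [pv_fold_get "proxy.name" "proxy.name=" 11 (by decide) (by decide) (by decide)]
  simp

theorem pv_fold_domain (ts : List String) :
    (ts.foldl pvStepB PySem.Dict.empty).get? "proxy.domain" =
      (ts.find? (fun t => PySem.Str.startswith t "proxy.domain=")).map
        (fun t => PySem.Str.slice t (some 13) none) := by
  rw [pv_fold_get "proxy.domain" "proxy.domain=" 13 (by decide) (by decide) (by decide)]
  simp

-- ===== VERDICT (by name: the statement is the Claim_ definition above) =====
theorem resolve_domain_py_spec : Claim_equal_resolve_domain_py := by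
  intro service tags _
  unfold Spec_resolve_domain_py resolve_domain_py resolve_domain_py_alt
  simp only [pv_loop_eq, pv_fold_name, pv_fold_domain, Option.none_or]
  cases (tags.find? (fun t => PySem.Str.startswith t "proxy.name=")).map
      (fun t => PySem.Str.slice t (some 11) none) with
  | some n =>
    cases (tags.find? (fun t => PySem.Str.startswith t "proxy.domain=")).map
        (fun t => PySem.Str.slice t (some 13) none) with
    | some d => by_cases hn : n = "" <;> by_cases hd : d = "" <;> simp [pvTruthy, hn, hd]
    | none => by_cases hn : n = "" <;> simp [pvTruthy, hn]
  | none =>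
    cases (tags.find? (fun t => PySem.Str.startswith t "proxy.domain=")).map
        (fun t => PySem.Str.slice t (some 13) none) with
    | some d => by_cases hd : d = "" <;> simp [pvTruthy, hd]
    | none => simp [pvTruthy]
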